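-- pv_equiv track=rewrite | github.com/andreea-burada/peag_2022 | homework_01/problem_01.py | no_asc_lines
-- ===== SOURCE A (Python) =====
-- def no_asc_lines(matrix):
--     no_lines = 0
--
--     # we check line by line if the line is ascending
--     for i in range(len(matrix)):
--         ok = 1
--         j = int(0)
--         while j < (len(matrix[i]) - 1) and ok == 1:
--             if matrix[i][j] >= matrix[i][j + 1]:
--                 ok = 0
--             j += 1
--         if ok == 1:
--             no_lines += 1
--
--     return no_lines
-- ===== SOURCE B (Python) =====
-- def no_asc_lines(matrix):
--     return sum(1 for row in matrix if list(row) == sorted(set(row)))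
-- ===== Notes on version B (the rewrite author's own statement) =====
-- stated objective: simpler
-- what changed: Replaces the index-driven while-loop adjacent-pair scan with a one-line comparison of each row against the sorted form of its set of elements (strict ascent iff row == sorted(set(row))), summed over rows.
import Mathlib
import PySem

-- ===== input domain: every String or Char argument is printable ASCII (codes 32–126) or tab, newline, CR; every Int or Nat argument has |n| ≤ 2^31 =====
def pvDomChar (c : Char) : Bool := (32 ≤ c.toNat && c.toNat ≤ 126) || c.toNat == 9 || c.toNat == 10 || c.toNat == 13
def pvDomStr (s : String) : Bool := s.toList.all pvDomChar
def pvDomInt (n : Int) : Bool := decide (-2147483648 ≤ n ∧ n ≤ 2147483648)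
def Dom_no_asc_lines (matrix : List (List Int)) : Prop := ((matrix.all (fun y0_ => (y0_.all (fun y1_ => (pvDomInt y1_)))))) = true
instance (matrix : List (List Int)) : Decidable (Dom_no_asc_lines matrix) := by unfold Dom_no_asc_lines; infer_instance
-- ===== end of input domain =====

-- B replaces A's index/flag while-loop scan with a per-row comparison against sorted(set(row)), summed over rows (objective: simpler).
-- ===== PORT A =====
-- inner while loop of A: `while j < len(matrix[i]) - 1 and ok == 1` (fuel bounds the iterations; the loop advances j each step)
def pvLineLoop (row : List Int) (j ok : Int) : Nat → Int
  | 0 => ok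
  | fuel + 1 =>
    if j < (row.length : Int) - 1 ∧ ok = 1 then
      pvLineLoop row (j + 1)
        (if PySem.List.pyGetD row j 0 ≥ PySem.List.pyGetD row (j + 1) 0 then 0 else ok) fuel
    else ok

def no_asc_lines (matrix : List (List Int)) : Int :=
  (PySem.List.pyRange 0 (matrix.length : Int) 1).foldl
    (fun no_lines i =>
      if pvLineLoop (PySem.List.pyGetD matrix i []) 0 1 (PySem.List.pyGetD matrix i []).length = 1
      then no_lines + 1 else no_lines) 0

-- ===== PORT B =====
def no_asc_lines_alt (matrix : List (List Int)) : Int :=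
  matrix.foldl
    (fun acc row =>
      if row = PySem.List.sorted (PySem.Set.ofList row) (fun x => x) false then acc + 1 else acc) 0

-- ===== PRECONDITION & SPEC =====
def Spec_no_asc_lines (matrix : List (List Int)) (out : Int) : Prop := out = no_asc_lines_alt matrix
instance (matrix : List (List Int)) (out : Int) : Decidable (Spec_no_asc_lines matrix out) := by unfold Spec_no_asc_lines; infer_instance

-- ===== CLAIM (what is proved, stated in full; the proofs are below) =====
def Claim_equal_no_asc_lines : Prop := ∀ (matrix : List (List Int)), Dom_no_asc_lines matrix → Spec_no_asc_lines matrix (no_asc_lines matrix)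

-- ===== LEMMAS AND PROOFS =====

lemma pvChain'_of_short {α : Type} {R : α → α → Prop} :
    ∀ {l : List α}, l.length ≤ 1 → List.IsChain R l
  | [], _ => by simp
  | [_], _ => by simp
  | _ :: _ :: _, h => absurd h (by simp)

-- once ok = 0, the while loop exits and returns 0
lemma pvLineLoop_zero (row : List Int) (j : Int) :
    ∀ fuel : Nat, pvLineLoop row j 0 fuel = 0 := by
  intro fuel
  cases fuel <;> simp [pvLineLoop]

-- the while loop from index j decides strict ascent of the suffix
lemma pvLineLoop_char (row : List Int) :
    ∀ (fuel j : Nat), row.length - 1 - j ≤ fuel →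
      pvLineLoop row (j : Int) 1 fuel
        = if List.IsChain (· < ·) (row.drop j) then 1 else 0 := by
  intro fuel
  induction fuel with
  | zero =>
    intro j hj
    have hlen : (row.drop j).length ≤ 1 := by simp; omega
    rw [if_pos (pvChain'_of_short hlen)]
    rfl
  | succ f ih =>
    intro j hj
    by_cases hcase : j + 1 < row.length
    · have hjr : (j : Int) < (row.length : Int) - 1 := by
        omega
      have hget1 : PySem.List.pyGetD row (j : Int) 0 = row[j]'(by omega) := by
        rw [PySem.List.pyGetD_natCast, List.getD_eq_getElem]
      have hget2 : PySem.List.pyGetD row ((j : Int) + 1) 0 = row[j+1]'(by omega) := by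
        have : (j : Int) + 1 = ((j + 1 : Nat) : Int) := by omega
        rw [this, PySem.List.pyGetD_natCast, List.getD_eq_getElem]
      have hdropj : row.drop j = row[j]'(by omega) :: row.drop (j + 1) :=
        List.drop_eq_getElem_cons (by omega)
      have hdropj1 : row.drop (j + 1) = row[j+1]'(by omega) :: row.drop (j + 2) :=
        List.drop_eq_getElem_cons (by omega)
      have hchain : List.IsChain (· < ·) (row.drop j)
          ↔ (row[j]'(by omega) < row[j+1]'(by omega) ∧ List.IsChain (· < ·) (row.drop (j + 1))) := by
        rw [hdropj]
        nth_rewrite 1 [hdropj1]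
        rw [List.isChain_cons_cons, ← hdropj1]
      show pvLineLoop row (j : Int) 1 (f + 1) = _
      rw [pvLineLoop]
      rw [if_pos ⟨hjr, rfl⟩, hget1, hget2]
      by_cases hge : row[j]'(by omega) ≥ row[j+1]'(by omega)
      · rw [if_pos hge, pvLineLoop_zero]
        have : ¬ List.IsChain (· < ·) (row.drop j) := by
          rw [hchain]; push Not; intro h; omega
        rw [if_neg this]
      · rw [if_neg hge]
        have hrec := ih (j + 1) (by omega)
        have hcast : ((j + 1 : Nat) : Int) = (j : Int) + 1 := by push_cast; ring
        rw [hcast] at hrec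
        rw [hrec]
        by_cases hc : List.IsChain (· < ·) (row.drop (j + 1))
        · rw [if_pos hc, if_pos (hchain.mpr ⟨by omega, hc⟩)]
        · rw [if_neg hc, if_neg (by rw [hchain]; tauto)]
    · -- loop condition fails: j ≥ len - 1
      have hjr : ¬ ((j : Int) < (row.length : Int) - 1 ∧ (1 : Int) = 1) := by
        push Not; intro h; exfalso; omega
      have hlen : (row.drop j).length ≤ 1 := by simp; omega
      rw [pvLineLoop, if_neg hjr, if_pos (pvChain'_of_short hlen)]

-- a row equals sorted(set(row)) iff it is strictly ascending
lemma pvRow_sorted_iff_chain (row : List Int) :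
    (row = PySem.List.sorted (PySem.Set.ofList row) (fun x => x) false)
      ↔ List.IsChain (· < ·) row := by
  constructor
  · intro h
    have hp := PySem.List.sorted_ofList_pairwise_lt row
    rw [← h] at hp
    exact List.isChain_iff_pairwise.mpr hp
  · intro hc
    have hp : row.Pairwise (· < ·) := List.isChain_iff_pairwise.mp hc
    have hnd : row.Nodup := hp.imp (fun h => ne_of_lt h)
    rw [PySem.Set.ofList_eq_self_of_nodup row hnd]
    exact (PySem.List.sorted_eq_self_of_pairwise row (fun x => x)
      (hp.imp (fun h => le_of_lt h))).symm

-- ===== VERDICT (by name: the statement is the Claim_ definition above) =====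
theorem no_asc_lines_spec : Claim_equal_no_asc_lines := by
  intro matrix _
  unfold Spec_no_asc_lines no_asc_lines no_asc_lines_alt
  rw [PySem.List.foldl_pyRange_zero_pyGetD' matrix []
    (fun acc row => if pvLineLoop row 0 1 row.length = 1 then acc + 1 else acc) 0]
  refine List.foldl_ext _ _ 0 ?_
  intro acc row _
  have h0 : pvLineLoop row ((0 : Nat) : Int) 1 row.length
      = if List.IsChain (· < ·) (row.drop 0) then 1 else 0 :=
    pvLineLoop_char row row.length 0 (by omega)
  simp only [List.drop_zero, Nat.cast_zero] at h0
  rw [h0]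
  by_cases hc : List.IsChain (· < ·) row
  · rw [if_pos hc, if_pos ((pvRow_sorted_iff_chain row).mpr hc), if_pos rfl]
  · rw [if_neg hc, if_neg (fun h => hc ((pvRow_sorted_iff_chain row).mp h)), if_neg (by decide)]
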